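-- pv_equiv track=rewrite | github.com/Pierre-Sassoulas/shadok | shadok/tests/generic_shadok_test.py | all_capitalization
-- ===== SOURCE A (Python) =====
-- import itertools
--
-- def all_capitalization(word):
--     return list(
--         map(
--             "".join,
--             itertools.product(
--                 *((character.upper(), character.lower()) for character in word)
--             ),
--         )
--     )
-- ===== SOURCE B (Python) =====
-- def all_capitalization(word):
--     if not word:
--         return ['']
--     rest = all_capitalization(word[1:])
--     return [c + s for c in (word[0].upper(), word[0].lower()) for s in rest]
-- ===== Notes on version B (the rewrite author's own statement) =====
-- stated objective: alternative
-- what changed: Replaces itertools.product (iterative doubling over per-character (upper,lower) pools, joined at the end) with a direct recursion over the string that prefixes each case of the first character onto all capitalizations of the rest.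
import Mathlib
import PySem

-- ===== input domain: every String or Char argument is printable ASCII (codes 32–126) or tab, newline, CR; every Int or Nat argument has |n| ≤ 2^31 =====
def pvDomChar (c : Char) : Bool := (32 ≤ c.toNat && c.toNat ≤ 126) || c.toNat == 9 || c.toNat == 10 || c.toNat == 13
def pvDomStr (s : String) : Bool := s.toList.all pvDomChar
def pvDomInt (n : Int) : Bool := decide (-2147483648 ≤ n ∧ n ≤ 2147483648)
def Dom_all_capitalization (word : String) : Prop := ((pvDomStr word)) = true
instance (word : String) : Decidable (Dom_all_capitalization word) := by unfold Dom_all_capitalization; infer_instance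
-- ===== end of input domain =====

-- B recurses over the string instead of folding itertools.product's doubling loop; same cost, different decomposition.

-- ===== PORT A =====
-- itertools.product documented algorithm: result = [[]]; for pool in pools: result = [x+[y] for x in result for y in pool]
def pvProductStep (acc : List (List Char)) (pool : List Char) : List (List Char) :=
  acc.flatMap (fun x => pool.map (fun y => x ++ [y]))

def all_capitalization (word : String) : List String :=
  let pools : List (List Char) :=
    word.toList.map (fun ch => [PySem.Chars.upperChar ch, PySem.Chars.lowerChar ch])
  let prods : List (List Char) := pools.foldl pvProductStep [[]]
  -- "".join over a tuple of one-character strings = the string of those characters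
  prods.map (fun cs => String.ofList cs)

-- ===== PORT B =====
def pvAltGo : List Char → List String
  | [] => [""]
  | ch :: t =>
    let rest := pvAltGo t
    [PySem.Chars.upperChar ch, PySem.Chars.lowerChar ch].flatMap
      (fun c => rest.map (fun s => String.ofList [c] ++ s))

def all_capitalization_alt (word : String) : List String :=
  pvAltGo word.toList

-- ===== PRECONDITION & SPEC =====
def Spec_all_capitalization (word : String) (out : List String) : Prop := out = all_capitalization_alt word
instance (word : String) (out : List String) : Decidable (Spec_all_capitalization word out) := by unfold Spec_all_capitalization; infer_instance

-- ===== CLAIM (what is proved, stated in full; the proofs are below) =====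
def Claim_equal_all_capitalization : Prop := ∀ (word : String), Dom_all_capitalization word → Spec_all_capitalization word (all_capitalization word)

-- ===== LEMMAS AND PROOFS =====

-- right-fold characterisation of the product
def pvRecP : List (List Char) → List (List Char)
  | [] => [[]]
  | p :: t => p.flatMap (fun y => (pvRecP t).map (fun s => y :: s))

theorem pvFoldl_prod (pools : List (List Char)) :
    ∀ acc : List (List Char),
      pools.foldl pvProductStep acc = acc.flatMap (fun x => (pvRecP pools).map (fun s => x ++ s)) := by
  induction pools with
  | nil => intro acc; simp [pvRecP]
  | cons p t ih =>
    intro acc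
    simp only [List.foldl_cons, ih, pvProductStep, pvRecP]
    simp [List.flatMap_assoc, List.flatMap_map, List.map_flatMap, List.map_map,
      Function.comp_def, List.append_assoc]

theorem pvMk_cons (c : Char) (s : List Char) : String.ofList [c] ++ String.ofList s = String.ofList (c :: s) := by
  rw [← String.ofList_append]; rfl

theorem pvRec_alt (l : List Char) :
    (pvRecP (l.map (fun ch => [PySem.Chars.upperChar ch, PySem.Chars.lowerChar ch]))).map
        (fun cs => String.ofList cs) = pvAltGo l := by
  induction l with
  | nil => simp [pvRecP, pvAltGo, String.ofList_nil]
  | cons ch t ih =>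
    simp only [List.map_cons, pvRecP, pvAltGo, List.map_flatMap, List.map_map, ← ih]
    congr 1
    funext y
    simp [Function.comp, pvMk_cons]

-- ===== VERDICT (by name: the statement is the Claim_ definition above) =====
theorem all_capitalization_spec : Claim_equal_all_capitalization := by
  intro word _
  unfold Spec_all_capitalization all_capitalization all_capitalization_alt
  simp only [pvFoldl_prod, List.flatMap_cons, List.flatMap_nil, List.nil_append, List.append_nil,
    List.map_map]
  rw [← pvRec_alt word.toList]
  simp [Function.comp]
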